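-- pv_equiv track=rewrite | github.com/UdaraNnuwan/project | container_ad_pipeline/realtime.py | reason_from_top_features
-- ===== SOURCE A (Python) =====
-- def reason_from_top_features(top_features: list[str]) -> str:
--     if any(feature in top_features for feature in ["mem_rss", "mem_util", "mem_cache"]):
--         return "abnormal memory behavior detected"
--     if "cpu_util" in top_features:
--         return "abnormal CPU behavior detected"
--     if any(feature in top_features for feature in ["net_in", "net_out"]):
--         return "abnormal network behavior detected"
--     if any(feature in top_features for feature in ["disk_read", "disk_write"]):
--         return "abnormal disk I/O behavior detected"
--     return "abnormal multivariate behavior detected"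
-- ===== SOURCE B (Python) =====
-- PRIORITY = {
--     "mem_rss": 0, "mem_util": 0, "mem_cache": 0,
--     "cpu_util": 1,
--     "net_in": 2, "net_out": 2,
--     "disk_read": 3, "disk_write": 3,
-- }
--
-- REASONS = [
--     "abnormal memory behavior detected",
--     "abnormal CPU behavior detected",
--     "abnormal network behavior detected",
--     "abnormal disk I/O behavior detected",
--     "abnormal multivariate behavior detected",
-- ]
--
--
-- def reason_from_top_features(top_features: list[str]) -> str:
--     best = 4
--     for feature in top_features:
--         best = min(best, PRIORITY.get(feature, 4))
--     return REASONS[best]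
-- ===== Notes on version B (the rewrite author's own statement) =====
-- stated objective: alternative
-- what changed: Instead of testing four fixed feature groups against the list in priority order, B makes a single pass over top_features keeping the minimum priority rank seen (via a feature->rank dict) and indexes a reason table with that rank; correct because the groups are disjoint and the if-chain returns the reason of the lowest-ranked group present.
import Mathlib
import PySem

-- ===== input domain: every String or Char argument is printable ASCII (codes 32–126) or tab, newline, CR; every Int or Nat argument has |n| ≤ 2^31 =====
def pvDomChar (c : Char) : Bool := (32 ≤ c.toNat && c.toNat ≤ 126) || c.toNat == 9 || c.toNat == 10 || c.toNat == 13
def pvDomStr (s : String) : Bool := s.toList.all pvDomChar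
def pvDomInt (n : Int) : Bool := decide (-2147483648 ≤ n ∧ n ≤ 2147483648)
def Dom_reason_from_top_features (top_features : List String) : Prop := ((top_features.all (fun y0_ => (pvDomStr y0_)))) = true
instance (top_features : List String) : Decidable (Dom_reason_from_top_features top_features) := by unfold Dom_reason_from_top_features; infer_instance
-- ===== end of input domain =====

-- B trades A's priority if-chain for a single pass over top_features that keeps the minimum
-- priority rank seen (feature->rank dict) and indexes a reason table (alternative decomposition).


-- ===== PORT A =====
def reason_from_top_features (top_features : List String) : String :=
  if ["mem_rss", "mem_util", "mem_cache"].any (fun feature => top_features.contains feature) then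
    "abnormal memory behavior detected"
  else if top_features.contains "cpu_util" then
    "abnormal CPU behavior detected"
  else if ["net_in", "net_out"].any (fun feature => top_features.contains feature) then
    "abnormal network behavior detected"
  else if ["disk_read", "disk_write"].any (fun feature => top_features.contains feature) then
    "abnormal disk I/O behavior detected"
  else
    "abnormal multivariate behavior detected"

-- ===== PORT B =====
def pvPriority : PySem.Dict String Int :=
  PySem.Dict.ofList
    [ ("mem_rss", 0), ("mem_util", 0), ("mem_cache", 0),
      ("cpu_util", 1),
      ("net_in", 2), ("net_out", 2),
      ("disk_read", 3), ("disk_write", 3) ]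

def pvReasons : List String :=
  [ "abnormal memory behavior detected",
    "abnormal CPU behavior detected",
    "abnormal network behavior detected",
    "abnormal disk I/O behavior detected",
    "abnormal multivariate behavior detected" ]

-- REASONS[best] never raises (0 ≤ best ≤ 4 always), so the .getD "" default is never used.
def reason_from_top_features_alt (top_features : List String) : String :=
  let best := top_features.foldl (fun best feature => min best (pvPriority.getD feature 4)) 4
  (PySem.List.pyGet? pvReasons best).getD ""

-- ===== PRECONDITION & SPEC =====
def Spec_reason_from_top_features (top_features : List String) (out : String) : Prop := out = reason_from_top_features_alt top_features
instance (top_features : List String) (out : String) : Decidable (Spec_reason_from_top_features top_features out) := by unfold Spec_reason_from_top_features; infer_instance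

-- ===== CLAIM =====
def Claim_equal_reason_from_top_features : Prop := ∀ (top_features : List String), Dom_reason_from_top_features top_features → Spec_reason_from_top_features top_features (reason_from_top_features top_features)

-- ===== LEMMAS AND PROOFS =====

def pvPrio (f : String) : Int := pvPriority.getD f 4

lemma pvPrio_le_zero (f : String) :
    pvPrio f ≤ 0 ↔ f = "mem_rss" ∨ f = "mem_util" ∨ f = "mem_cache" := by
  simp only [pvPrio, pvPriority, PySem.Dict.ofList, PySem.Dict.update,
    PySem.Dict.getD_insert, PySem.Dict.getD_empty, List.foldl]
  split_ifs <;> simp_all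

lemma pvPrio_le_one (f : String) :
    pvPrio f ≤ 1 ↔ f = "mem_rss" ∨ f = "mem_util" ∨ f = "mem_cache" ∨ f = "cpu_util" := by
  simp only [pvPrio, pvPriority, PySem.Dict.ofList, PySem.Dict.update,
    PySem.Dict.getD_insert, PySem.Dict.getD_empty, List.foldl]
  split_ifs <;> simp_all

lemma pvPrio_le_two (f : String) :
    pvPrio f ≤ 2 ↔ f = "mem_rss" ∨ f = "mem_util" ∨ f = "mem_cache" ∨ f = "cpu_util" ∨
      f = "net_in" ∨ f = "net_out" := by
  simp only [pvPrio, pvPriority, PySem.Dict.ofList, PySem.Dict.update,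
    PySem.Dict.getD_insert, PySem.Dict.getD_empty, List.foldl]
  split_ifs <;> simp_all

lemma pvPrio_le_three (f : String) :
    pvPrio f ≤ 3 ↔ f = "mem_rss" ∨ f = "mem_util" ∨ f = "mem_cache" ∨ f = "cpu_util" ∨
      f = "net_in" ∨ f = "net_out" ∨ f = "disk_read" ∨ f = "disk_write" := by
  simp only [pvPrio, pvPriority, PySem.Dict.ofList, PySem.Dict.update,
    PySem.Dict.getD_insert, PySem.Dict.getD_empty, List.foldl]
  split_ifs <;> simp_all

lemma pvPrio_nonneg (f : String) : 0 ≤ pvPrio f := by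
  simp only [pvPrio, pvPriority, PySem.Dict.ofList, PySem.Dict.update,
    PySem.Dict.getD_insert, PySem.Dict.getD_empty, List.foldl]
  split_ifs <;> simp

lemma pvFold_le_iff (tf : List String) (a k : Int) :
    tf.foldl (fun b f => min b (pvPrio f)) a ≤ k ↔ a ≤ k ∨ ∃ f ∈ tf, pvPrio f ≤ k := by
  induction tf generalizing a with
  | nil => simp
  | cons x xs ih =>
      simp only [List.foldl_cons, ih, min_le_iff, List.mem_cons]
      constructor
      · rintro ((h | h) | ⟨f, hf, hle⟩)
        · exact Or.inl h
        · exact Or.inr ⟨x, Or.inl rfl, h⟩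
        · exact Or.inr ⟨f, Or.inr hf, hle⟩
      · rintro (h | ⟨f, (rfl | hf), hle⟩)
        · exact Or.inl (Or.inl h)
        · exact Or.inl (Or.inr hle)
        · exact Or.inr ⟨f, hf, hle⟩

lemma pvFold_nonneg (tf : List String) (a : Int) (ha : 0 ≤ a) :
    0 ≤ tf.foldl (fun b f => min b (pvPrio f)) a := by
  induction tf generalizing a with
  | nil => simpa
  | cons x xs ih => exact ih _ (le_min ha (pvPrio_nonneg x))

-- ===== VERDICT =====
theorem reason_from_top_features_spec : Claim_equal_reason_from_top_features := by
  intro tf _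
  unfold Spec_reason_from_top_features reason_from_top_features reason_from_top_features_alt
  show _ = (PySem.List.pyGet? pvReasons (tf.foldl (fun b f => min b (pvPrio f)) 4)).getD ""
  set m := tf.foldl (fun b f => min b (pvPrio f)) 4 with hm
  have hnn : 0 ≤ m := pvFold_nonneg tf 4 (by norm_num)
  have hle : ∀ k : Int, m ≤ k ↔ 4 ≤ k ∨ ∃ f ∈ tf, pvPrio f ≤ k := fun k => pvFold_le_iff tf 4 k
  by_cases h0 : "mem_rss" ∈ tf ∨ "mem_util" ∈ tf ∨ "mem_cache" ∈ tf
  · have hm0 : m = 0 := le_antisymm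
      ((hle 0).mpr (Or.inr (by
        rcases h0 with h | h | h
        · exact ⟨_, h, (pvPrio_le_zero _).mpr (Or.inl rfl)⟩
        · exact ⟨_, h, (pvPrio_le_zero _).mpr (Or.inr (Or.inl rfl))⟩
        · exact ⟨_, h, (pvPrio_le_zero _).mpr (Or.inr (Or.inr rfl))⟩))) hnn
    rw [if_pos (by simpa using h0), hm0]
    rfl
  · have c0 : ¬ (∃ f ∈ tf, pvPrio f ≤ 0) := by
      rintro ⟨f, hf, hp⟩
      rcases (pvPrio_le_zero f).mp hp with rfl | rfl | rfl <;> tauto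
    have hgt0 : ¬ m ≤ 0 := by intro h; rcases (hle 0).mp h with h | h; exacts [absurd h (by omega), c0 h]
    rw [if_neg (by simpa using h0)]
    by_cases h1 : "cpu_util" ∈ tf
    · have hm1 : m = 1 := le_antisymm
        ((hle 1).mpr (Or.inr ⟨_, h1, (pvPrio_le_one _).mpr (by tauto)⟩)) (by omega)
      rw [if_pos (by simpa using h1), hm1]
      rfl
    · have c1 : ¬ (∃ f ∈ tf, pvPrio f ≤ 1) := by
        rintro ⟨f, hf, hp⟩
        rcases (pvPrio_le_one f).mp hp with rfl | rfl | rfl | rfl <;> tauto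
      have hgt1 : ¬ m ≤ 1 := by intro h; rcases (hle 1).mp h with h | h; exacts [absurd h (by omega), c1 h]
      rw [if_neg (by simpa using h1)]
      by_cases h2 : "net_in" ∈ tf ∨ "net_out" ∈ tf
      · have hm2 : m = 2 := le_antisymm
          ((hle 2).mpr (Or.inr (by
            rcases h2 with h | h
            · exact ⟨_, h, (pvPrio_le_two _).mpr (by tauto)⟩
            · exact ⟨_, h, (pvPrio_le_two _).mpr (by tauto)⟩))) (by omega)
        rw [if_pos (by simpa using h2), hm2]
        rfl
      · have c2 : ¬ (∃ f ∈ tf, pvPrio f ≤ 2) := by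
          rintro ⟨f, hf, hp⟩
          rcases (pvPrio_le_two f).mp hp with rfl | rfl | rfl | rfl | rfl | rfl <;> tauto
        have hgt2 : ¬ m ≤ 2 := by intro h; rcases (hle 2).mp h with h | h; exacts [absurd h (by omega), c2 h]
        rw [if_neg (by simpa using h2)]
        by_cases h3 : "disk_read" ∈ tf ∨ "disk_write" ∈ tf
        · have hm3 : m = 3 := le_antisymm
            ((hle 3).mpr (Or.inr (by
              rcases h3 with h | h
              · exact ⟨_, h, (pvPrio_le_three _).mpr (by tauto)⟩
              · exact ⟨_, h, (pvPrio_le_three _).mpr (by tauto)⟩))) (by omega)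
          rw [if_pos (by simpa using h3), hm3]
          rfl
        · have c3 : ¬ (∃ f ∈ tf, pvPrio f ≤ 3) := by
            rintro ⟨f, hf, hp⟩
            rcases (pvPrio_le_three f).mp hp with rfl | rfl | rfl | rfl | rfl | rfl | rfl | rfl <;> tauto
          have hgt3 : ¬ m ≤ 3 := by intro h; rcases (hle 3).mp h with h | h; exacts [absurd h (by omega), c3 h]
          have hm4 : m = 4 := le_antisymm ((hle 4).mpr (Or.inl le_rfl)) (by omega)
          rw [if_neg (by simpa using h3), hm4]
          rfl
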